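-- pv_equiv track=rewrite | github.com/springhana/CodingTest_python | 프로그래머스/0/181932. 코드 처리하기/코드 처리하기.py | solution
-- ===== SOURCE A (Python) =====
-- def solution(code):
--     answer = []
--     mode = 0
--     for i in range(len(code)):
--         if code[i] == "1":
--             if mode == 0:
--                 mode = 1
--             else:
--                 mode = 0
--         else:
--             if i % 2 == 0:
--                 if mode == 0:
--                     answer.append(code[i])
--             else:
--                 if mode == 1:
--                     answer.append(code[i])
--
--     return ''.join(answer) if len(answer) else "EMPTY"
-- ===== SOURCE B (Python) =====
-- def solution(code):
--     # prefix[i] = parity (0/1) of the number of '1' chars strictly before index i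
--     prefix = [0] * (len(code) + 1)
--     for i, c in enumerate(code):
--         prefix[i + 1] = prefix[i] ^ (c == "1")
--     kept = [c for i, c in enumerate(code) if c != "1" and i % 2 == prefix[i]]
--     return ''.join(kept) if kept else "EMPTY"
-- ===== Notes on version B (the rewrite author's own statement) =====
-- stated objective: alternative
-- what changed: Replaced the single stateful toggle loop with a precomputed prefix table of '1'-count parities followed by a separate stateless filtering pass over enumerate(code).
import Mathlib
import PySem

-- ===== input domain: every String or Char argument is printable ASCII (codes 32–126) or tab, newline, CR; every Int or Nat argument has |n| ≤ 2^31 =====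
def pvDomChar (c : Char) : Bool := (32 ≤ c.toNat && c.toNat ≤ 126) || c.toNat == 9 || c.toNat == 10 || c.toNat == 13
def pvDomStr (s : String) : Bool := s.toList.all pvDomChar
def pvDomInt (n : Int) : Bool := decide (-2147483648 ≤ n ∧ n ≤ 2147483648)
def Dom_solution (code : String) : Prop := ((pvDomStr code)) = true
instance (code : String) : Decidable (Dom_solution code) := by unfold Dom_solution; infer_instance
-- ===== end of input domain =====

-- B replaces A's single stateful toggle loop by a precomputed prefix table of
-- '1'-count parities consumed by a separate filtering pass (alternative decomposition, same cost).

-- ===== PORT A =====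
-- A's loop over range(len(code)): structural recursion over the chars carrying
-- the index i, the toggle `mode` and the accumulator `answer`, branch for branch.
def solutionGo : List Char → Nat → Nat → List Char → List Char
  | [], _, _, answer => answer
  | c :: rest, i, mode, answer =>
    if c = '1' then
      solutionGo rest (i + 1) (if mode = 0 then 1 else 0) answer
    else
      if i % 2 = 0 then
        solutionGo rest (i + 1) mode (if mode = 0 then answer ++ [c] else answer)
      else
        solutionGo rest (i + 1) mode (if mode = 1 then answer ++ [c] else answer)

def solution (code : String) : String :=
  let answer := solutionGo code.toList 0 0 []
  if answer.length ≠ 0 then String.mk answer else "EMPTY"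

-- ===== PORT B =====
-- prefix[i+1] = prefix[i] ^ (c == "1")
def solutionStep (p : Nat) (c : Char) : Nat := p ^^^ (if c = '1' then 1 else 0)

def solution_alt (code : String) : String :=
  let chars := code.toList
  let pre := List.scanl solutionStep 0 chars   -- the prefix-parity table
  let kept := ((chars.zipIdx).filter
      (fun p => (p.1 != '1') && (p.2 % 2 == pre.getD p.2 0))).map Prod.fst
  if kept.isEmpty then "EMPTY" else String.mk kept

-- ===== PRECONDITION & SPEC =====
def Spec_solution (code : String) (out : String) : Prop := out = solution_alt code
instance (code : String) (out : String) : Decidable (Spec_solution code out) := by unfold Spec_solution; infer_instance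

-- ===== CLAIM (what is proved, stated in full; the proofs are below) =====
def Claim_equal_solution : Prop := ∀ (code : String), Dom_solution code → Spec_solution code (solution code)

-- ===== LEMMAS AND PROOFS =====

-- common specification: the kept characters of the suffix `chars`, whose first
-- character has global index i, when the current toggle state is m
def pvKept : List Char → Nat → Nat → List Char
  | [], _, _ => []
  | c :: rest, i, m =>
    if c = '1' then pvKept rest (i + 1) (if m = 0 then 1 else 0)
    else (if i % 2 = 0 then (if m = 0 then [c] else [])
          else (if m = 1 then [c] else [])) ++ pvKept rest (i + 1) m

theorem solutionGo_eq_pvKept (chars : List Char) :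
    ∀ i m acc, solutionGo chars i m acc = acc ++ pvKept chars i m := by
  induction chars with
  | nil => intro i m acc; simp [solutionGo, pvKept]
  | cons c rest ih =>
    intro i m acc
    simp only [solutionGo, pvKept]
    split_ifs <;> simp [ih, List.append_assoc]

theorem scanl_getD (chars : List Char) :
    ∀ m k, k ≤ chars.length →
      (List.scanl solutionStep m chars).getD k 0 = List.foldl solutionStep m (chars.take k) := by
  induction chars with
  | nil =>
    intro m k hk
    have hk0 : k = 0 := by simpa using hk
    subst hk0; simp
  | cons c rest ih =>
    intro m k hk
    cases k with
    | zero => simp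
    | succ k => simpa [List.scanl] using ih (solutionStep m c) k (by simpa using hk)

theorem filter_eq_pvKept (chars : List Char) :
    ∀ i m, m ≤ 1 →
    ∀ Q : List Nat, (∀ k, k ≤ chars.length → Q.getD (i + k) 0 = List.foldl solutionStep m (chars.take k)) →
      ((chars.zipIdx i).filter (fun p => (p.1 != '1') && (p.2 % 2 == Q.getD p.2 0))).map Prod.fst
        = pvKept chars i m := by
  induction chars with
  | nil => intro i m _ Q _; simp [pvKept]
  | cons c rest ih =>
    intro i m hm Q hQ
    have hQ0 : Q.getD i 0 = m := by simpa using hQ 0 (by simp)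
    have hQtail : ∀ k, k ≤ rest.length →
        Q.getD (i + 1 + k) 0 = List.foldl solutionStep (solutionStep m c) (rest.take k) := by
      intro k hk
      have := hQ (k + 1) (by simpa using Nat.succ_le_succ hk)
      simpa [List.foldl, Nat.add_comm, Nat.add_assoc, Nat.add_left_comm] using this
    have hQ0' : Q[i]?.getD 0 = m := by simpa [List.getD] using hQ0
    by_cases hc : c = '1'
    · have hstep : solutionStep m c = (if m = 0 then 1 else 0) := by
        interval_cases m <;> simp [solutionStep, hc]
      have hm' : (if m = 0 then 1 else 0) ≤ 1 := by split_ifs <;> omega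
      have := ih (i + 1) (if m = 0 then 1 else 0) hm' Q (by simpa [hstep] using hQtail)
      simp only [List.zipIdx_cons, List.filter_cons, pvKept, hc]
      simpa [hc, List.getD] using this
    · have hstep : solutionStep m c = m := by simp [solutionStep, hc]
      have hthis := ih (i + 1) m hm Q (by simpa [hstep] using hQtail)
      have hthis' := hthis
      simp only [List.getD] at hthis'
      simp only [List.zipIdx_cons, List.filter_cons, pvKept, hc]
      rcases Nat.even_or_odd i with he | ho
      · have h2 : i % 2 = 0 := Nat.even_iff.mp he
        interval_cases m <;> simp [hc, hQ0', h2, hthis']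
      · have h2 : i % 2 = 1 := Nat.odd_iff.mp ho
        interval_cases m <;> simp [hc, hQ0', h2, hthis']

-- ===== VERDICT (by name: the statement is the Claim_ definition above) =====
theorem solution_spec : Claim_equal_solution := by
  intro code _
  unfold Spec_solution solution solution_alt
  have hA := solutionGo_eq_pvKept code.toList 0 0 []
  have hB := filter_eq_pvKept code.toList 0 0 (by omega)
      (List.scanl solutionStep 0 code.toList)
      (by intro k hk; simpa using scanl_getD code.toList 0 k hk)
  simp only [hA, List.nil_append, hB]
  cases pvKept code.toList 0 0 <;> simp
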